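-- pv_equiv track=rewrite | github.com/online-ml/river | creme/time_series/arima.py | make_coeffs
-- ===== SOURCE A (Python) =====
-- import math
--
-- def make_coeffs(d, m):
--     """Precomputes the coefficients of the backshift operator.
--
--     Example:
--
--         >>> make_coeffs(1, 1)
--         {0: -1}
--
--         >>> make_coeffs(2, 1)
--         {0: -2, 1: 1}
--
--         >>> make_coeffs(3, 1)
--         {0: -3, 1: 3, 2: -1}
--
--         >>> make_coeffs(2, 7)
--         {6: -2, 13: 1}
--
--     """
--
--     def n_choose_k(n, k):
--         f = math.factorial
--         return f(n) // f(k) // f(n - k)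
--
--     return dict(
--         (
--             k * m - 1,
--             int(math.copysign(1, (k + 1) % 2 - 1)) * n_choose_k(n=d, k=k)
--         )
--         for k in range(1, d + 1)
--     )
-- ===== SOURCE B (Python) =====
-- def make_coeffs(d, m):
--     """Precomputes the coefficients of the backshift operator.
--
--     Single pass: maintains the binomial coefficient C(d, k) incrementally via
--     the multiplicative recurrence C(d, k) = C(d, k-1) * (d - k + 1) // k,
--     alternating the sign, instead of recomputing three factorials per term.
--     """
--     out = {}
--     c = 1
--     for k in range(1, d + 1):
--         c = c * (d - k + 1) // k
--         out[k * m - 1] = -c if k % 2 else c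
--     return out
-- ===== Notes on version B (the rewrite author's own statement) =====
-- stated objective: faster
-- what changed: Replaces the per-term three-factorial computation of C(d,k) with a single running product using the multiplicative binomial recurrence c = c*(d-k+1)//k, with an alternating sign instead of the copysign/parity trick.
import Mathlib
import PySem

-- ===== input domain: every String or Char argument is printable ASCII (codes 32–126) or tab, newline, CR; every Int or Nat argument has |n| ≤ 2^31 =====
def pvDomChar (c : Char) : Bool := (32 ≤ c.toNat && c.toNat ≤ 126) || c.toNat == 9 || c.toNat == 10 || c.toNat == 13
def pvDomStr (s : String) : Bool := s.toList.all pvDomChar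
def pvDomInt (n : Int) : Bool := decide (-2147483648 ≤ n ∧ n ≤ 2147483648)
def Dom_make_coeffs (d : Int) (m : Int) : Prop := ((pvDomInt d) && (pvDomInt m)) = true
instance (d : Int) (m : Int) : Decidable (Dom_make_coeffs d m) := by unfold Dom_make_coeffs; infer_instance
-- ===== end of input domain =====

-- B replaces A's three-factorial binomial per term by an O(d) running multiplicative recurrence (objective: faster).


-- ===== PORT A =====
-- math.factorial; only ever called with nonnegative arguments here (1 ≤ k ≤ d), where toNat is exact
def pyFact (n : Int) : Int := (Nat.factorial n.toNat : Int)

-- inner helper n_choose_k: f(n) // f(k) // f(n - k)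
def n_choose_k (n : Int) (k : Int) : Int :=
  PySem.Int.floordiv (PySem.Int.floordiv (pyFact n) (pyFact k)) (pyFact (n - k))

-- int(math.copysign(1, (k + 1) % 2 - 1)): the argument is an exact integer (-1 or 0), so the
-- result is -1 iff it is negative, else 1 (copysign(1, 0) = 1.0); exact on this domain
def signA (k : Int) : Int := if PySem.Int.mod (k + 1) 2 - 1 < 0 then -1 else 1

def make_coeffs (d : Int) (m : Int) : List (Int × Int) :=
  ((PySem.List.pyRange 1 (d + 1) 1).foldl
    (fun acc k => acc.insert (k * m - 1) (signA k * n_choose_k d k))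
    (PySem.Dict.empty : PySem.Dict Int Int)).items

-- ===== PORT B =====
def make_coeffs_alt (d : Int) (m : Int) : List (Int × Int) :=
  (((PySem.List.pyRange 1 (d + 1) 1).foldl
    (fun (st : PySem.Dict Int Int × Int) k =>
      let c := PySem.Int.floordiv (st.2 * (d - k + 1)) k
      (st.1.insert (k * m - 1) (if PySem.Int.mod k 2 ≠ 0 then -c else c), c))
    ((PySem.Dict.empty : PySem.Dict Int Int), 1)).1).items

-- ===== PRECONDITION & SPEC =====
def Spec_make_coeffs (d : Int) (m : Int) (out : List (Int × Int)) : Prop := out = make_coeffs_alt d m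
instance (d : Int) (m : Int) (out : List (Int × Int)) : Decidable (Spec_make_coeffs d m out) := by unfold Spec_make_coeffs; infer_instance

-- ===== CLAIM (what is proved, stated in full; the proofs are below) =====
def Claim_equal_make_coeffs : Prop := ∀ (d : Int) (m : Int), Dom_make_coeffs d m → Spec_make_coeffs d m (make_coeffs d m)

-- ===== LEMMAS AND PROOFS =====

-- A's per-term value is the signed binomial coefficient
lemma valA_eq (n : Nat) (k : Nat) (hkn : k ≤ n) :
    signA (k : Int) * n_choose_k (n : Int) (k : Int)
      = (if PySem.Int.mod (k : Int) 2 ≠ 0 then -((n.choose k : Nat) : Int) else ((n.choose k : Nat) : Int)) := by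
  have hsub : (n : Int) - (k : Int) = ((n - k : Nat) : Int) := by omega
  have hcc : n_choose_k (n : Int) (k : Int) = ((n.choose k : Nat) : Int) := by
    simp only [n_choose_k, pyFact, hsub, Int.toNat_natCast, PySem.Int.floordiv_natCast]
    norm_cast
    rw [Nat.div_div_eq_div_mul, Nat.choose_eq_factorial_div_factorial hkn]
  have hmodk : PySem.Int.mod (k : Int) 2 = ((k % 2 : Nat) : Int) :=
    PySem.Int.mod_natCast k 2
  have hmodk1 : PySem.Int.mod ((k : Int) + 1) 2 = (((k + 1) % 2 : Nat) : Int) := by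
    exact_mod_cast PySem.Int.mod_natCast (k + 1) 2
  rw [hcc, signA, hmodk, hmodk1]
  rcases Nat.even_or_odd k with he | ho
  · have h2 : k % 2 = 0 := Nat.even_iff.mp he
    have h1 : (k + 1) % 2 = 1 := by omega
    simp [h1, h2]
  · have h2 : k % 2 = 1 := Nat.odd_iff.mp ho
    have h1 : (k + 1) % 2 = 0 := by omega
    simp [h1, h2]

-- B's running product satisfies the binomial recurrence
lemma c_step (n j : Nat) (hj : j + 1 ≤ n) :
    PySem.Int.floordiv (((n.choose j : Nat) : Int) * ((n : Int) - ((j : Int) + 1) + 1)) ((j : Int) + 1)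
      = ((n.choose (j + 1) : Nat) : Int) := by
  have hsub : (n : Int) - ((j : Int) + 1) + 1 = ((n - j : Nat) : Int) := by omega
  have hrec : (n.choose j) * (n - j) = n.choose (j + 1) * (j + 1) :=
    (Nat.choose_succ_right_eq n j).symm
  rw [hsub]
  rw [PySem.Int.floordiv_eq_ediv_of_pos (by positivity)]
  have : ((n.choose j : Nat) : Int) * ((n - j : Nat) : Int) = ((n.choose (j + 1) : Nat) : Int) * ((j : Int) + 1) := by
    exact_mod_cast congrArg (fun x : Nat => (x : Int)) hrec
  rw [this, Int.mul_ediv_cancel _ (by positivity)]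

-- coupled invariant: after the first j steps the two folds hold the same dict, and B's counter is C(n, j)
lemma fold_inv (n : Nat) (m : Int) (j : Nat) (hj : j ≤ n) :
    (PySem.List.pyRange 1 ((j : Int) + 1) 1).foldl
        (fun (st : PySem.Dict Int Int × Int) k =>
          let c := PySem.Int.floordiv (st.2 * ((n : Int) - k + 1)) k
          (st.1.insert (k * m - 1) (if PySem.Int.mod k 2 ≠ 0 then -c else c), c))
        ((PySem.Dict.empty : PySem.Dict Int Int), 1)
      = ((PySem.List.pyRange 1 ((j : Int) + 1) 1).foldl
          (fun acc k => acc.insert (k * m - 1) (signA k * n_choose_k (n : Int) k))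
          (PySem.Dict.empty : PySem.Dict Int Int),
         ((n.choose j : Nat) : Int)) := by
  induction j with
  | zero => simp [PySem.List.pyRange_one_eq_nil]
  | succ j ih =>
    have hsplit : PySem.List.pyRange 1 (((j : Int) + 1) + 1) 1
        = PySem.List.pyRange 1 ((j : Int) + 1) 1 ++ [(j : Int) + 1] := by
      exact PySem.List.pyRange_one_succ_right (by omega)
    have hj' : j ≤ n := by omega
    have hcast : ((j + 1 : Nat) : Int) = (j : Int) + 1 := by push_cast; ring
    rw [hcast, hsplit, List.foldl_append, List.foldl_append, ih hj']
    simp only [List.foldl_cons, List.foldl_nil]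
    rw [c_step n j hj]
    have hv := valA_eq n (j + 1) hj
    push_cast at hv
    rw [hv]

-- ===== VERDICT (by name: the statement is the Claim_ definition above) =====
theorem make_coeffs_spec : Claim_equal_make_coeffs := by
  intro d m _
  unfold Spec_make_coeffs make_coeffs make_coeffs_alt
  by_cases hd : d ≤ 0
  · rw [PySem.List.pyRange_one_eq_nil (by omega)]
    rfl
  · have hn : d = ((d.toNat : Nat) : Int) := by omega
    rw [hn, fold_inv d.toNat m d.toNat (le_refl _)]
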